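-- pv_equiv track=rewrite | github.com/lucaskuzma/small-network | eval_ambient.py | get_pitches_by_voice
-- ===== SOURCE A (Python) =====
-- from typing import List, Set, Tuple, Optional
--
-- def get_pitches_by_voice(notes: List[dict]) -> dict:
--     """Group pitches by channel/track (as proxy for voice)."""
--     voices = {}
--     for n in notes:
--         voice_id = (n["track"], n["channel"])
--         if voice_id not in voices:
--             voices[voice_id] = []
--         voices[voice_id].append(n)
--     return voices
-- ===== SOURCE B (Python) =====
-- def get_pitches_by_voice(notes):
--     """Group pitches by channel/track (as proxy for voice)."""
--     keys = []
--     for n in notes: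
--         k = (n["track"], n["channel"])
--         if k not in keys:
--             keys.append(k)
--     return {k: [m for m in notes if (m["track"], m["channel"]) == k] for k in keys}
-- ===== Notes on version B (the rewrite author's own statement) =====
-- stated objective: alternative
-- what changed: A buckets notes into a dict in one pass with per-key list appends; B first collects the first-appearance-ordered distinct (track, channel) keys, then builds each group by filtering the note list once per key.
import Mathlib
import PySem

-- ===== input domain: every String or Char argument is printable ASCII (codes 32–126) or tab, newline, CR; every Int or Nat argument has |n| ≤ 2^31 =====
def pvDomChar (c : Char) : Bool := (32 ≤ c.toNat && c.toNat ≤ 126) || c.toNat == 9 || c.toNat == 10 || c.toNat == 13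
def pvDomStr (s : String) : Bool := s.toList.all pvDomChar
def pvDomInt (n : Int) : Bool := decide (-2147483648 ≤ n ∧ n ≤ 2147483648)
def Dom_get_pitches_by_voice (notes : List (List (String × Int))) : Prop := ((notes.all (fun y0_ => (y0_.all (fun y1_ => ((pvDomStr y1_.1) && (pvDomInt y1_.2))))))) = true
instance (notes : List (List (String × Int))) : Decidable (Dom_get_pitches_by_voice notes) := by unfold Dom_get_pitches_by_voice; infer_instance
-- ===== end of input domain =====

-- B replaces A's single hash-bucketing pass by a first-appearance key pass plus one filter per key
-- (objective: alternative decomposition, not faster). Equivalence of the RETURN value is proved on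
-- Pre_ (every note dict carries both keys, exactly where Python A returns without a KeyError).

-- n["track"] / n["channel"]: first-match lookup in the note's association list; none = KeyError
def pvNoteKey (n : List (String × Int)) : Option (Int × Int) :=
  match (PySem.Dict.mk n).get? "track", (PySem.Dict.mk n).get? "channel" with
  | some t, some c => some (t, c)
  | _, _ => none

-- ===== PORT A =====
def get_pitches_by_voice (notes : List (List (String × Int))) : List (Int × Int × List (List (String × Int))) :=
  (notes.foldl
    (fun voices n =>
      match pvNoteKey n with
      | none => voices            -- Python raises KeyError here; excluded by Pre_
      | some vid =>
        (if voices.contains vid then voices else voices.insert vid []).modify vid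
          [] (fun l => l ++ [n]))
    (PySem.Dict.empty : PySem.Dict (Int × Int) (List (List (String × Int))))).items.map
    (fun p => (p.1.1, p.1.2, p.2))

-- ===== PORT B =====
def get_pitches_by_voice_alt (notes : List (List (String × Int))) : List (Int × Int × List (List (String × Int))) :=
  let keys := notes.foldl
    (fun ks n =>
      match pvNoteKey n with
      | none => ks                -- Python raises KeyError here; excluded by Pre_
      | some k => if k ∈ ks then ks else ks ++ [k])
    ([] : List (Int × Int))
  keys.map (fun k => (k.1, k.2, notes.filter (fun m => pvNoteKey m == some k)))

-- ===== PRECONDITION & SPEC =====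
-- Pre_: every note has both the "track" and the "channel" key — exactly where Python A returns (else KeyError).
def Pre_get_pitches_by_voice (notes : List (List (String × Int))) : Prop :=
  ∀ n ∈ notes, (pvNoteKey n).isSome
instance (notes : List (List (String × Int))) : Decidable (Pre_get_pitches_by_voice notes) := by unfold Pre_get_pitches_by_voice; infer_instance

def pvWitness_get_pitches_by_voice : (List (List (String × Int))) :=
  [[("track", 0), ("channel", 1), ("pitch", 60)], [("track", 0), ("channel", 1), ("pitch", 62)]]

def Spec_get_pitches_by_voice (notes : List (List (String × Int))) (out : List (Int × Int × List (List (String × Int)))) : Prop := out = get_pitches_by_voice_alt notes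
instance (notes : List (List (String × Int))) (out : List (Int × Int × List (List (String × Int)))) : Decidable (Spec_get_pitches_by_voice notes out) := by unfold Spec_get_pitches_by_voice; infer_instance

-- ===== CLAIM (what is proved, stated in full; the proofs are below) =====
def Claim_equal_get_pitches_by_voice : Prop := ∀ (notes : List (List (String × Int))), Dom_get_pitches_by_voice notes → Pre_get_pitches_by_voice notes → Spec_get_pitches_by_voice notes (get_pitches_by_voice notes)

-- ===== LEMMAS AND PROOFS =====

-- the total key used in the proofs; on Pre_ it agrees with pvNoteKey
def pvKeyD (n : List (String × Int)) : Int × Int :=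
  ((PySem.Dict.mk n).getD "track" 0, (PySem.Dict.mk n).getD "channel" 0)

lemma pvNoteKey_eq_keyD {n : List (String × Int)} (h : (pvNoteKey n).isSome) :
    pvNoteKey n = some (pvKeyD n) := by
  unfold pvNoteKey pvKeyD at *
  cases ht : (PySem.Dict.mk n).get? "track" <;> cases hc : (PySem.Dict.mk n).get? "channel" <;>
    simp [ht, hc, PySem.Dict.getD_eq_get?_getD] at h ⊢

-- A's conditional "insert [] then append" step is the unconditional modify step
lemma pv_step_eq (d : PySem.Dict (Int × Int) (List (List (String × Int)))) (k : Int × Int)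
    (n : List (String × Int)) :
    (if d.contains k then d else d.insert k []).modify k [] (fun l => l ++ [n])
      = d.modify k [] (fun l => l ++ [n]) := by
  by_cases h : d.contains k
  · simp [h]
  · simp only [h]
    rcases d with ⟨items⟩
    induction items with
    | nil => simp [PySem.Dict.insert, PySem.Dict.modify, PySem.Dict.contains, PySem.Dict.get?,
        PySem.Dict.getD]
    | cons p rest ih =>
      simp_all [PySem.Dict.insert, PySem.Dict.modify, PySem.Dict.contains, PySem.Dict.get?,
        PySem.Dict.getD, PySem.Dict.mk.injEq]

lemma pv_foldA (notes : List (List (String × Int)))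
    (hpre : ∀ n ∈ notes, (pvNoteKey n).isSome) :
    notes.foldl
      (fun voices n =>
        match pvNoteKey n with
        | none => voices
        | some vid =>
          (if voices.contains vid then voices else voices.insert vid []).modify vid
            [] (fun l => l ++ [n]))
      (PySem.Dict.empty : PySem.Dict (Int × Int) (List (List (String × Int))))
    = notes.foldl (fun d n => d.modify (pvKeyD n) [] (fun l => l ++ [n])) PySem.Dict.empty := by
  apply PySem.List.foldl_congr_mem
  intro acc x hx
  rw [pvNoteKey_eq_keyD (hpre x hx)]
  exact pv_step_eq acc (pvKeyD x) x

lemma pv_foldB (notes : List (List (String × Int)))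
    (hpre : ∀ n ∈ notes, (pvNoteKey n).isSome) :
    notes.foldl
      (fun ks n =>
        match pvNoteKey n with
        | none => ks
        | some k => if k ∈ ks then ks else ks ++ [k])
      ([] : List (Int × Int))
    = PySem.Set.ofList (notes.map pvKeyD) := by
  rw [← PySem.Set.update_nil_left, PySem.Set.update_map_eq_foldl_add]
  apply PySem.List.foldl_congr_mem
  intro acc x hx
  rw [pvNoteKey_eq_keyD (hpre x hx)]
  simp [PySem.Set.add]

lemma pv_getD (notes : List (List (String × Int))) (c : Int × Int) :
    (notes.foldl (fun d n => d.modify (pvKeyD n) [] (fun l => l ++ [n]))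
      (PySem.Dict.empty : PySem.Dict (Int × Int) (List (List (String × Int))))).getD c []
    = notes.filter (fun m => pvKeyD m == c) := by
  rw [show notes.foldl (fun d n => d.modify (pvKeyD n) [] (fun l => l ++ [n]))
        (PySem.Dict.empty : PySem.Dict (Int × Int) (List (List (String × Int))))
      = (notes.map (fun n => (pvKeyD n, n))).foldl
          (fun d p => d.modify p.1 [] (fun l => l ++ [p.2])) PySem.Dict.empty
    from (List.foldl_map (f := fun n => (pvKeyD n, n))
        (g := fun d p => d.modify p.1 [] (fun l => l ++ [p.2]))
        (l := notes) (init := PySem.Dict.empty)).symm]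
  rw [PySem.Dict.getD_foldl_modify_append]
  simp [List.filter_map, Function.comp_def]

theorem get_pitches_by_voice_spec : Claim_equal_get_pitches_by_voice := by
  intro notes _ hpre
  unfold Spec_get_pitches_by_voice get_pitches_by_voice get_pitches_by_voice_alt
  rw [pv_foldA notes hpre, pv_foldB notes hpre]
  rw [PySem.Dict.items_eq_map_keys _
    (PySem.Dict.nodup_keys_foldl_modify_key notes pvKeyD [] (fun _ x => fun l => l ++ [x]) _
      (by simp [PySem.Dict.keys_empty])) []]
  rw [PySem.Dict.keys_foldl_modify_key, PySem.Dict.keys_empty, PySem.Set.update_nil_left,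
    List.map_map]
  apply List.map_congr_left
  intro k hk
  simp only [Function.comp_def, pv_getD notes k]
  refine congrArg _ (congrArg _ (List.filter_congr ?_))
  intro m hm
  rw [pvNoteKey_eq_keyD (hpre m hm)]
  simp
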